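-- pv_equiv track=rewrite | github.com/dragon-zzuni/offline_agent | src/ui/main_window.py | _generate_brief_summary
-- ===== SOURCE A (Python) =====
-- from typing import Dict, List, Optional, Any, Set
-- from collections import Counter, defaultdict
--
-- def _generate_brief_summary(messages: list, key_points: Optional[List[str]] = None) -> str:
--     """간결한 요약 생성 (1-2줄)"""
--     if not messages:
--         return "메시지 없음"
--
--     total = len(messages)
--     email_count = sum(1 for m in messages if m.get("type") == "email")
--     messenger_count = total - email_count
--
--     # 주요 발신자
--     senders = [m.get("sender", "Unknown") for m in messages]
--     sender_counts = Counter(senders)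
--     top_sender = sender_counts.most_common(1)[0] if sender_counts else ("Unknown", 0)
--
--     summary_text = f"총 {total}건 (이메일 {email_count}, 메신저 {messenger_count})"
--
--     if key_points:
--         cleaned_points = [kp.strip() for kp in key_points if kp and kp.strip()]
--         if cleaned_points:
--             highlights = " · ".join(cleaned_points[:2])
--             summary_text += f" | {highlights}"
--             return summary_text
--
--     return f"{summary_text} | 주요 발신자: {top_sender[0]} ({top_sender[1]}건)"
-- ===== SOURCE B (Python) =====
-- def _generate_brief_summary(messages, key_points=None):
--     if not messages:
--         return "메시지 없음"
--
--     total = len(messages)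
--     email_count = [m.get("type") for m in messages].count("email")
--     summary_text = f"총 {total}건 (이메일 {email_count}, 메신저 {total - email_count})"
--
--     if key_points:
--         cleaned = [kp.strip() for kp in key_points if kp and kp.strip()]
--         if cleaned:
--             return summary_text + " | " + " · ".join(cleaned[:2])
--
--     # top sender found lazily, without any dict: for each sender in order,
--     # count its occurrences with list.count and keep the first strictly-best one
--     senders = [m.get("sender", "Unknown") for m in messages]
--     best_s, best_c = "Unknown", 0
--     for s in senders:
--         c = senders.count(s)
--         if c > best_c:
--             best_s, best_c = s, c
--     return f"{summary_text} | 주요 발신자: {best_s} ({best_c}건)"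
-- ===== Notes on version B (the rewrite author's own statement) =====
-- stated objective: alternative
-- what changed: B drops the Counter/dict entirely: it returns early from the key_points branch before ever building a sender tally, counts emails with list.count over the extracted type column, and finds the top sender by a quadratic scan that re-counts each sender in place with list.count, keeping the first strictly-best one (which reproduces most_common's earliest-insertion tie-break).
import Mathlib
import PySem

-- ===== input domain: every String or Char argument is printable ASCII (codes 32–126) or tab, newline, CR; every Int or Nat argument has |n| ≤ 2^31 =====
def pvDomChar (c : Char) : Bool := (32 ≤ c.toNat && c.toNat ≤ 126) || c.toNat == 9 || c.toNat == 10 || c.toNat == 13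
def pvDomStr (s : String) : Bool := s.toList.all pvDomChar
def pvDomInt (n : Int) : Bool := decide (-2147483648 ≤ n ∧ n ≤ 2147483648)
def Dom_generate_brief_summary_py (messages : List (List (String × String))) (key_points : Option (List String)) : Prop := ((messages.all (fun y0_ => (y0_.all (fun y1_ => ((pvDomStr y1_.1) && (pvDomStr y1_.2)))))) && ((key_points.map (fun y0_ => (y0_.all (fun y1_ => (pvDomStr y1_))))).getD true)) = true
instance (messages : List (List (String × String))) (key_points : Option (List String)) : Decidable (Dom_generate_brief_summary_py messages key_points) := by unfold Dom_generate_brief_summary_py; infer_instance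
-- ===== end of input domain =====

-- B: no dict/Counter at all — early return from the key_points branch, email count via list.count
-- on the type column, and the top sender by a quadratic strict-greater scan re-counting with list.count.


-- ===== PORT A =====
def generate_brief_summary_py (messages : List (List (String × String))) (key_points : Option (List String)) : String :=
  if messages = [] then "메시지 없음"
  else
    let total : Int := messages.length
    let email_count : Int :=
      messages.foldl (fun acc m => if (PySem.Dict.ofList m).get? "type" == some "email" then acc + 1 else acc) 0
    let messenger_count : Int := total - email_count
    let senders : List String := messages.map (fun m => (PySem.Dict.ofList m).getD "sender" "Unknown")
    let sender_counts : PySem.Dict String Int := PySem.Dict.counter senders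
    let top_sender : String × Int :=
      if sender_counts.items ≠ [] then
        -- most_common(1)[0]: stable sort of the items by count, descending; take 1; element 0
        ((PySem.List.sorted sender_counts.items (fun p => p.2) true).take 1).headD ("Unknown", 0)
      else ("Unknown", 0)
    let summary_text : String :=
      "총 " ++ PySem.Int.toStr total ++ "건 (이메일 " ++ PySem.Int.toStr email_count ++
        ", 메신저 " ++ PySem.Int.toStr messenger_count ++ ")"
    let fallback : String :=
      summary_text ++ " | 주요 발신자: " ++ top_sender.1 ++ " (" ++ PySem.Int.toStr top_sender.2 ++ "건)"
    match key_points with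
    | none => fallback
    | some kps =>
      if kps ≠ [] then
        let cleaned_points := (kps.filter (fun kp => kp ≠ "" && PySem.Str.strip kp ≠ "")).map PySem.Str.strip
        if cleaned_points ≠ [] then
          summary_text ++ " | " ++ PySem.Str.join " · " (PySem.List.slice cleaned_points none (some 2))
        else fallback
      else fallback

-- ===== PORT B =====
-- the fallback return: top sender by a quadratic scan re-counting each sender with list.count
def pvTopLine (messages : List (List (String × String))) (summary_text : String) : String :=
  let senders : List String := messages.map (fun m => (PySem.Dict.ofList m).getD "sender" "Unknown")
  let best : String × Int :=
    senders.foldl (fun b s =>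
      let c : Int := (PySem.List.count senders s : Int)
      if c > b.2 then (s, c) else b) ("Unknown", 0)
  summary_text ++ " | 주요 발신자: " ++ best.1 ++ " (" ++ PySem.Int.toStr best.2 ++ "건)"

def generate_brief_summary_py_alt (messages : List (List (String × String))) (key_points : Option (List String)) : String :=
  if messages.isEmpty then "메시지 없음"
  else
    let total : Int := messages.length
    let email_count : Int :=
      (PySem.List.count (messages.map (fun m => (PySem.Dict.ofList m).get? "type")) (some "email") : Int)
    let summary_text : String :=
      "총 " ++ PySem.Int.toStr total ++ "건 (이메일 " ++ PySem.Int.toStr email_count ++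
        ", 메신저 " ++ PySem.Int.toStr (total - email_count) ++ ")"
    match key_points with
    | none => pvTopLine messages summary_text
    | some kps =>
      if kps ≠ [] then
        let cleaned := (kps.filter (fun kp => kp ≠ "" && PySem.Str.strip kp ≠ "")).map PySem.Str.strip
        if cleaned ≠ [] then
          summary_text ++ " | " ++ PySem.Str.join " · " (PySem.List.slice cleaned none (some 2))
        else pvTopLine messages summary_text
      else pvTopLine messages summary_text

-- ===== PRECONDITION & SPEC =====
def Spec_generate_brief_summary_py (messages : List (List (String × String))) (key_points : Option (List String)) (out : String) : Prop := out = generate_brief_summary_py_alt messages key_points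
instance (messages : List (List (String × String))) (key_points : Option (List String)) (out : String) : Decidable (Spec_generate_brief_summary_py messages key_points out) := by unfold Spec_generate_brief_summary_py; infer_instance

-- ===== CLAIM =====
def Claim_equal_generate_brief_summary_py : Prop := ∀ (messages : List (List (String × String))) (key_points : Option (List String)), Dom_generate_brief_summary_py messages key_points → Spec_generate_brief_summary_py messages key_points (generate_brief_summary_py messages key_points)

-- ===== LEMMAS AND PROOFS =====

-- head of one insertion step of the descending stable insertion sort
theorem pv_head_insertBy {α κ : Type} [LinearOrder κ] (key : α → κ) (x : α) (acc : List α) :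
    (PySem.List.insertBy (fun a b => decide (key b < key a)) x acc).head? =
      some (match acc.head? with
            | none => x
            | some m => if key m < key x then x else m) := by
  cases acc with
  | nil => rfl
  | cons y ys =>
    simp only [PySem.List.insertBy]
    by_cases h : key y < key x <;> simp [h]

-- head of the descending stable insertion sort = Python max? (first extremal element)
theorem pv_head_sorted_rev {α κ : Type} [LinearOrder κ] (xs : List α) (key : α → κ) :
    (PySem.List.sorted xs key true).head? = PySem.List.max? xs key := by
  rw [PySem.List.sorted_rev_eq_foldl_insertBy]
  show _ = List.foldl _ none xs
  have : ∀ (l : List α) (acc : List α),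
      (l.foldl (fun acc x => PySem.List.insertBy (fun a b => decide (key b < key a)) x acc) acc).head? =
        l.foldl (fun o x => match o with
                  | none => some x
                  | some m => if key m < key x then some x else some m) acc.head? := by
    intro l
    induction l with
    | nil => intro acc; rfl
    | cons x t ih =>
      intro acc
      simp only [List.foldl_cons, ih, pv_head_insertBy key x acc]
      cases acc.head? with
      | none => rfl
      | some m => by_cases h : key m < key x <;> simp [h]
  simpa using this xs []

theorem pv_max?_cons {α κ : Type} [LinearOrder κ] (key : α → κ) (x : α) (t : List α) :
    PySem.List.max? (x :: t) key = some (t.foldl (fun m y => if key m < key y then y else m) x) := by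
  induction t generalizing x with
  | nil => rfl
  | cons y r ih =>
    have h1 : PySem.List.max? (x :: y :: r) key = PySem.List.max? ((if key x < key y then y else x) :: r) key := by
      simp only [PySem.List.max?, List.foldl_cons]
      by_cases h : key x < key y <;> simp [h]
    rw [h1, ih]
    by_cases h : key x < key y <;> simp [h, List.foldl_cons]

-- the strict-greater running max starting at a 0 count = Python max? with default, for positive counts
theorem pv_fold_best_eq_max (xs : List (String × Int)) (hpos : ∀ p ∈ xs, 0 < p.2) :
    xs.foldl (fun b p => if p.2 > b.2 then p else b) (("Unknown" : String), (0 : Int)) =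
      (PySem.List.max? xs (fun p => p.2)).getD ("Unknown", 0) := by
  cases xs with
  | nil => rfl
  | cons x t =>
    rw [pv_max?_cons]
    have hx : 0 < x.2 := hpos x List.mem_cons_self
    simp only [List.foldl_cons, gt_iff_lt, hx, if_pos, Option.getD_some]

-- max? over a list appended with one element
theorem pv_max?_append_singleton {α κ : Type} [LinearOrder κ] (key : α → κ) (l : List α) (x : α) :
    PySem.List.max? (l ++ [x]) key =
      some (match PySem.List.max? l key with
            | none => x
            | some m => if key m < key x then x else m) := by
  show List.foldl _ none (l ++ [x]) = _
  rw [List.foldl_append]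
  show (match PySem.List.max? l key with
        | none => some x
        | some m => if key m < key x then some x else some m) = _
  cases PySem.List.max? l key with
  | none => rfl
  | some m => by_cases h : key m < key x <;> simp [h]

-- max? is invariant under first-occurrence dedup of the underlying keys (duplicates map to identical pairs)
theorem pv_max?_dedup_map (xs : List String) (c : String → Int) :
    PySem.List.max? ((PySem.Set.ofList xs).map (fun k => (k, c k))) (fun p => p.2) =
      PySem.List.max? (xs.map (fun k => (k, c k))) (fun p => p.2) := by
  induction xs using List.reverseRecOn with
  | nil => rfl
  | append_singleton t s ih =>
    rw [PySem.Set.ofList_append_singleton]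
    by_cases hmem : s ∈ t
    · have hsmem : s ∈ PySem.Set.ofList t := (PySem.Set.mem_ofList t s).mpr hmem
      rw [PySem.Set.add_of_mem hsmem, ih, List.map_append]
      simp only [List.map_cons, List.map_nil]
      rw [pv_max?_append_singleton]
      cases hM : PySem.List.max? (t.map (fun k => (k, c k))) (fun p => p.2) with
      | none =>
        have h0 := (PySem.List.max?_eq_none_iff _ _).mp hM
        rw [List.map_eq_nil_iff] at h0
        subst h0
        simp at hmem
      | some m =>
        have hle := PySem.List.max?_isMax hM (s, c s) (List.mem_map.mpr ⟨s, hmem, rfl⟩)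
        simp [not_lt.mpr hle]
    · have hsnm : s ∉ PySem.Set.ofList t := fun h => hmem ((PySem.Set.mem_ofList t s).mp h)
      rw [PySem.Set.add_of_not_mem hsnm, List.map_append, List.map_append]
      simp only [List.map_cons, List.map_nil]
      rw [pv_max?_append_singleton, pv_max?_append_singleton, ih]

-- both email-count loops count the messages whose "type" is "email"
theorem pv_email_count (messages : List (List (String × String))) :
    messages.foldl (fun acc m => if (PySem.Dict.ofList m).get? "type" == some "email" then acc + 1 else acc) (0 : Int) =
      (PySem.List.count (messages.map (fun m => (PySem.Dict.ofList m).get? "type")) (some "email") : Int) := by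
  rw [PySem.List.foldl_if_add_one, PySem.List.count_eq, List.count_eq_countP, List.countP_map]
  have : (fun m : List (String × String) => (PySem.Dict.ofList m).get? "type" == some "email") =
      ((fun x => x == some "email") ∘ fun m => (PySem.Dict.ofList m).get? "type") := by
    funext m; simp [Function.comp, BEq.comm]
  rw [this]
  simp

-- the two top-sender computations agree (senders nonempty)
theorem pv_top_pair (senders : List String) (hsne : senders ≠ []) :
    (if (PySem.Dict.counter senders).items ≠ [] then
        ((PySem.List.sorted (PySem.Dict.counter senders).items (fun p => p.2) true).take 1).headD
          (("Unknown" : String), (0 : Int))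
      else ("Unknown", 0)) =
      senders.foldl (fun b s =>
        let c : Int := (PySem.List.count senders s : Int)
        if c > b.2 then (s, c) else b) ("Unknown", 0) := by
  have hpos : ∀ p ∈ (PySem.Dict.counter senders).items, 0 < p.2 := by
    intro p hp
    rw [PySem.Dict.items_counter] at hp
    obtain ⟨k, hk, rfl⟩ := List.mem_map.mp hp
    have : k ∈ senders := (PySem.Set.mem_ofList senders k).mp hk
    show (0 : Int) < ((List.count k senders : Nat) : Int)
    exact_mod_cast List.count_pos_iff.mpr this
  have hne : (PySem.Dict.counter senders).items ≠ [] := by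
    cases senders with
    | nil => exact absurd rfl hsne
    | cons a t =>
      rw [PySem.Dict.items_counter]
      have ha : a ∈ PySem.Set.ofList (a :: t) := (PySem.Set.mem_ofList _ _).mpr (by simp)
      simp only [ne_eq, List.map_eq_nil_iff]
      intro h0
      rw [h0] at ha
      simp at ha
  rw [if_pos hne]
  -- A side: head of the descending sort = max? over the counter items
  have htopA :
      (((PySem.List.sorted (PySem.Dict.counter senders).items (fun p => p.2) true).take 1).headD
          (("Unknown" : String), (0 : Int))) =
        (PySem.List.max? (PySem.Dict.counter senders).items (fun p => p.2)).getD ("Unknown", 0) := by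
    rw [← pv_head_sorted_rev]
    cases hs : (PySem.List.sorted (PySem.Dict.counter senders).items (fun p => p.2) true) with
    | nil => exact absurd ((PySem.List.sorted_eq_nil_iff _ _ _).mp hs) hne
    | cons a u => simp
  have hdedup :
      PySem.List.max? ((PySem.Set.ofList senders).map (fun k => (k, (senders.count k : Int)))) (fun p => p.2) =
        PySem.List.max? (senders.map (fun k => (k, (PySem.List.count senders k : Int)))) (fun p => p.2) := by
    have := pv_max?_dedup_map senders (fun k => (senders.count k : Int))
    simpa [PySem.List.count_eq] using this
  have hposm : ∀ p ∈ senders.map (fun k => (k, (PySem.List.count senders k : Int))), 0 < p.2 := by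
    intro p hp
    obtain ⟨k, hk, rfl⟩ := List.mem_map.mp hp
    show (0 : Int) < ((PySem.List.count senders k : Nat) : Int)
    rw [PySem.List.count_eq]
    exact_mod_cast List.count_pos_iff.mpr hk
  rw [htopA, PySem.Dict.items_counter, hdedup, ← pv_fold_best_eq_max _ hposm]
  exact List.foldl_map

-- main equivalence
theorem pv_main (messages : List (List (String × String))) (key_points : Option (List String)) :
    generate_brief_summary_py messages key_points = generate_brief_summary_py_alt messages key_points := by
  cases messages with
  | nil => rfl
  | cons m0 rest =>
    unfold generate_brief_summary_py generate_brief_summary_py_alt pvTopLine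
    simp only [List.isEmpty_cons, reduceCtorEq, if_false]
    rw [pv_email_count]
    rw [pv_top_pair ((m0 :: rest).map (fun m => (PySem.Dict.ofList m).getD "sender" "Unknown")) (by simp)]

-- ===== VERDICT =====
theorem generate_brief_summary_py_spec : Claim_equal_generate_brief_summary_py := by
  intro messages key_points _
  show generate_brief_summary_py messages key_points = generate_brief_summary_py_alt messages key_points
  exact pv_main messages key_points
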